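-- pv_equiv track=rewrite | github.com/seankmartin/atn-sub-lfp-workflow | workflow/scripts/sleep_utils.py | cap_intervals
-- ===== SOURCE A (Python) =====
-- def cap_intervals(intervals, tol=200):
--     new_intervals = []
--     for interval in intervals:
--         start, end = interval
--         while (len(new_intervals) == 0) or (new_intervals[-1][-1] != end):
--             if (end - start) > (tol + 50):
--                 new_intervals.append((start, start + tol))
--                 start = start + tol
--             else:
--                 new_intervals.append((start, end))
--     return new_intervals
-- ===== SOURCE B (Python) =====
-- def cap_intervals(intervals, tol=200):
--     new_intervals = []
--     for start, end in intervals: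
--         if new_intervals and new_intervals[-1][1] == end:
--             continue
--         if end - start > tol + 50:
--             n = -((tol + 50 - end + start) // tol)
--         else:
--             n = 0
--         new_intervals.extend(
--             (start + i * tol, start + (i + 1) * tol) for i in range(n)
--         )
--         new_intervals.append((start + n * tol, end))
--     return new_intervals
-- ===== Notes on version B (the rewrite author's own statement) =====
-- stated objective: alternative
-- what changed: Replaces A's self-referential while-loop (which re-checks the output list's last end each step and appends one tol-chunk per iteration) with a per-interval duplicate-end guard skip plus a closed-form chunk count n = ceil((end-start-tol-50)/tol) and a single generated range pass.
-- outside the precondition, e.g. on cap_intervals([(0, 40), (-100, 40)], 0): A returns [(0, 40)], B returns [(0, 40)]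
import Mathlib
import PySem

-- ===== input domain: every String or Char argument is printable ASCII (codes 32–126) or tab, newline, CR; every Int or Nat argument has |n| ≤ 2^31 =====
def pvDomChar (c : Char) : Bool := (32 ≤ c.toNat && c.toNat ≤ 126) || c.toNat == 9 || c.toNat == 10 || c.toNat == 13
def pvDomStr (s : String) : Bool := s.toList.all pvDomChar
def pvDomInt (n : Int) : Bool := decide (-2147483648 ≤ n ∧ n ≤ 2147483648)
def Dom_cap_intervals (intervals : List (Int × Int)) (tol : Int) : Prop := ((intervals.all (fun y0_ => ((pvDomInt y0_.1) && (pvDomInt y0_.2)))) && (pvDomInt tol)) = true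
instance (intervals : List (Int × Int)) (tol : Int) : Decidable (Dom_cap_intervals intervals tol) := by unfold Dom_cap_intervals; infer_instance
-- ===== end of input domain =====

-- B (alternative decomposition): replaces A's one-chunk-per-iteration while-loop (which re-inspects
-- the output list's last element each step) with a duplicate-end guard skip, a closed-form chunk count
-- and a single generated range pass per interval.

-- ===== PORT A =====

-- new_intervals[-1][-1]: second component of the last pair (only evaluated on non-empty lists)
def pyLastSnd (l : List (Int × Int)) : Int := ((l.getLast?).map Prod.snd).getD 0

-- the while-loop of A, fuel makes the same computation total (Python diverges outside Pre_)
def capWhileA (fuel : Nat) (acc : List (Int × Int)) (start e tol : Int) : List (Int × Int) :=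
  match fuel with
  | 0 => acc
  | fuel + 1 =>
    if acc = [] ∨ pyLastSnd acc ≠ e then
      if e - start > tol + 50 then
        capWhileA fuel (acc ++ [(start, start + tol)]) (start + tol) e tol
      else
        capWhileA fuel (acc ++ [(start, e)]) start e tol
    else acc

def cap_intervals (intervals : List (Int × Int)) (tol : Int) : List (Int × Int) :=
  intervals.foldl (fun acc p => capWhileA ((p.2 - p.1).toNat + 2) acc p.1 p.2 tol) []

-- ===== PORT B =====

def cap_intervals_alt (intervals : List (Int × Int)) (tol : Int) : List (Int × Int) :=
  intervals.foldl (fun out p =>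
    if out ≠ [] ∧ pyLastSnd out = p.2 then out
    else
      let n : Int := if p.2 - p.1 > tol + 50 then -(PySem.Int.floordiv (tol + 50 - p.2 + p.1) tol) else 0
      (out ++ (PySem.List.pyRange 0 n 1).map (fun i => (p.1 + i * tol, p.1 + (i + 1) * tol)))
        ++ [(p.1 + n * tol, p.2)]) []

-- ===== PRECONDITION & SPEC =====

-- Pre_ excludes tol ≤ 0 combined with an interval wider than tol+50, where A's while-loop
-- in general fails to terminate (on a few such inputs A still returns, when the wide
-- interval is skipped by the duplicate-end guard; B returns the same value there).
def Pre_cap_intervals (intervals : List (Int × Int)) (tol : Int) : Prop :=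
  1 ≤ tol ∨ ∀ p ∈ intervals, p.2 - p.1 ≤ tol + 50
instance (intervals : List (Int × Int)) (tol : Int) : Decidable (Pre_cap_intervals intervals tol) := by unfold Pre_cap_intervals; infer_instance

def pvWitness_cap_intervals : (List (Int × Int)) × Int := ([(0, 500), (100, 500)], 200)

def Spec_cap_intervals (intervals : List (Int × Int)) (tol : Int) (out : List (Int × Int)) : Prop := out = cap_intervals_alt intervals tol
instance (intervals : List (Int × Int)) (tol : Int) (out : List (Int × Int)) : Decidable (Spec_cap_intervals intervals tol out) := by unfold Spec_cap_intervals; infer_instance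

-- ===== CLAIM (what is proved, stated in full; the proofs are below) =====
def Claim_equal_cap_intervals : Prop := ∀ (intervals : List (Int × Int)) (tol : Int), Dom_cap_intervals intervals tol → Pre_cap_intervals intervals tol → Spec_cap_intervals intervals tol (cap_intervals intervals tol)

-- ===== LEMMAS AND PROOFS =====

-- one-step unfolding of A's while-loop
theorem capWhileA_succ (fuel : Nat) (acc : List (Int × Int)) (s e tol : Int) :
    capWhileA (fuel + 1) acc s e tol =
      if acc = [] ∨ pyLastSnd acc ≠ e then
        if e - s > tol + 50 then capWhileA fuel (acc ++ [(s, s + tol)]) (s + tol) e tol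
        else capWhileA fuel (acc ++ [(s, e)]) s e tol
      else acc := rfl

-- the list of sub-intervals A's while-loop appends for one interval (s, e), fuel-indexed
def chunksF : Nat → Int → Int → Int → List (Int × Int)
  | 0, s, e, tol => if e - s > tol + 50 then [(s, s + tol)] else [(s, e)]
  | m + 1, s, e, tol =>
    if e - s > tol + 50 then (s, s + tol) :: chunksF m (s + tol) e tol else [(s, e)]

-- B's closed-form chunk count and the list of sub-intervals B emits for one interval
def chunkCount (s e tol : Int) : Int :=
  if e - s > tol + 50 then -(PySem.Int.floordiv (tol + 50 - e + s) tol) else 0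

def chunksB (s e tol : Int) : List (Int × Int) :=
  (PySem.List.pyRange 0 (chunkCount s e tol) 1).map (fun i => (s + i * tol, s + (i + 1) * tol))
    ++ [(s + chunkCount s e tol * tol, e)]

theorem pyLastSnd_concat (l : List (Int × Int)) (a b : Int) :
    pyLastSnd (l ++ [(a, b)]) = b := by
  simp [pyLastSnd]

theorem capWhileA_chunksF (e tol : Int) :
    ∀ (fuel : Nat) (s : Int) (acc : List (Int × Int)),
      (acc = [] ∨ pyLastSnd acc ≠ e) →
      capWhileA (fuel + 1) acc s e tol = acc ++ chunksF fuel s e tol := by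
  intro fuel
  induction fuel with
  | zero =>
    intro s acc hcond
    rw [capWhileA_succ, if_pos hcond]
    by_cases hbig : e - s > tol + 50 <;> simp [hbig, capWhileA, chunksF]
  | succ m ih =>
    intro s acc hcond
    rw [capWhileA_succ, if_pos hcond]
    by_cases hbig : e - s > tol + 50
    · rw [if_pos hbig]
      have hne : pyLastSnd (acc ++ [(s, s + tol)]) ≠ e := by
        rw [pyLastSnd_concat]; omega
      rw [ih (s + tol) (acc ++ [(s, s + tol)]) (Or.inr hne)]
      simp [chunksF, hbig]
    · rw [if_neg hbig, capWhileA_succ,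
        if_neg (by simp [pyLastSnd_concat] : ¬(acc ++ [(s, e)] = [] ∨ pyLastSnd (acc ++ [(s, e)]) ≠ e))]
      simp [chunksF, hbig]

-- characterization of the ceiling-division chunk count
theorem chunkCount_big (s e tol : Int) (htol : 1 ≤ tol) (hbig : e - s > tol + 50)
    (q : Int) (h1 : (q - 1) * tol < e - s - tol - 50) (h2 : e - s - tol - 50 ≤ q * tol) :
    chunkCount s e tol = q := by
  unfold chunkCount
  rw [if_pos hbig]
  have ha : tol + 50 - e + s = -(e - s - tol - 50) := by ring
  rw [ha]
  exact (PySem.Int.neg_floordiv_neg_eq_iff_of_pos (by omega)).mpr ⟨h1, h2⟩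

theorem chunkCount_nonneg (s e tol : Int) (htol : 1 ≤ tol) : 0 ≤ chunkCount s e tol := by
  unfold chunkCount
  split
  · have ha : tol + 50 - e + s = -(e - s - tol - 50) := by ring
    rw [ha]
    have h := (PySem.Int.neg_floordiv_neg_eq_iff_of_pos (a := e - s - tol - 50) (by omega : (0:Int) < tol)).mp rfl
    nlinarith [h.1, h.2]
  · omega

theorem chunkCount_step (s e tol : Int) (htol : 1 ≤ tol) (hbig : e - s > tol + 50) :
    chunkCount s e tol = chunkCount (s + tol) e tol + 1 := by
  by_cases h2 : e - (s + tol) > tol + 50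
  · -- the count for the rest satisfies the ceiling characterization shifted by one
    have hchar := (PySem.Int.neg_floordiv_neg_eq_iff_of_pos
      (a := e - (s + tol) - tol - 50) (by omega : (0:Int) < tol)).mp rfl
    have ha : tol + 50 - e + (s + tol) = -(e - (s + tol) - tol - 50) := by ring
    have hc' : chunkCount (s + tol) e tol = -(PySem.Int.floordiv (-(e - (s + tol) - tol - 50)) tol) := by
      unfold chunkCount; rw [if_pos h2, ha]
    rw [hc']
    apply chunkCount_big s e tol htol hbig
    · nlinarith [hchar.1]
    · nlinarith [hchar.2]
  · have hc0 : chunkCount (s + tol) e tol = 0 := by unfold chunkCount; rw [if_neg h2]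
    rw [hc0]
    apply chunkCount_big s e tol htol hbig <;> push_cast <;> nlinarith

theorem chunksB_cons (s e tol : Int) (htol : 1 ≤ tol) (hbig : e - s > tol + 50) :
    chunksB s e tol = (s, s + tol) :: chunksB (s + tol) e tol := by
  unfold chunksB
  have hstep := chunkCount_step s e tol htol hbig
  have hn' : 0 ≤ chunkCount (s + tol) e tol := chunkCount_nonneg (s + tol) e tol htol
  set n' : Int := chunkCount (s + tol) e tol with hn'def
  rw [hstep]
  rw [PySem.List.pyRange_one_cons (by omega : (0:Int) < n' + 1)]
  simp only [List.map_cons, zero_mul, add_zero, zero_add, one_mul, List.cons_append]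
  congr 1
  rw [show s + (n' + 1) * tol = s + tol + n' * tol from by ring]
  congr 1
  rw [PySem.List.pyRange_one 1 (n' + 1), PySem.List.pyRange_one 0 n']
  rw [show (n' + 1 - 1).toNat = (n' - 0).toNat from by omega]
  simp only [List.map_map]
  apply List.map_congr_left
  intro k _
  simp only [Function.comp, Prod.mk.injEq]
  constructor <;> ring

theorem chunksF_eq_chunksB (e tol : Int) :
    ∀ (fuel : Nat) (s : Int),
      ((1 ≤ tol ∧ e - s ≤ tol * fuel + tol + 50) ∨ e - s ≤ tol + 50) →
      chunksF fuel s e tol = chunksB s e tol := by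
  intro fuel
  induction fuel with
  | zero =>
    intro s hpre
    have hsmall : ¬ (e - s > tol + 50) := by
      rcases hpre with ⟨_, hb⟩ | hb
      · push_cast at hb; omega
      · omega
    simp [chunksF, chunksB, chunkCount, hsmall]
  | succ m ih =>
    intro s hpre
    by_cases hbig : e - s > tol + 50
    · obtain ⟨htol, hbound⟩ : 1 ≤ tol ∧ e - s ≤ tol * (m + 1 : Nat) + tol + 50 := by
        rcases hpre with h | h
        · exact h
        · omega
      simp only [chunksF, if_pos hbig]
      have hbound' : e - (s + tol) ≤ tol * (m : Nat) + tol + 50 := by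
        have hexp : tol * ((m : Int) + 1) = tol * (m : Int) + tol := by ring
        push_cast at hbound ⊢
        linarith [hexp ▸ hbound]
      rw [ih (s + tol) (Or.inl ⟨htol, hbound'⟩)]
      exact (chunksB_cons s e tol htol hbig).symm
    · simp [chunksF, chunksB, chunkCount, hbig]

-- the two per-interval step functions agree (under the per-interval precondition)
theorem step_eq (tol : Int) (p : Int × Int) (acc : List (Int × Int))
    (hpre : 1 ≤ tol ∨ p.2 - p.1 ≤ tol + 50) :
    capWhileA ((p.2 - p.1).toNat + 2) acc p.1 p.2 tol =
      (if acc ≠ [] ∧ pyLastSnd acc = p.2 then acc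
       else
         (acc ++ (PySem.List.pyRange 0
             (if p.2 - p.1 > tol + 50 then -(PySem.Int.floordiv (tol + 50 - p.2 + p.1) tol) else 0) 1).map
             (fun i => (p.1 + i * tol, p.1 + (i + 1) * tol)))
           ++ [(p.1 + (if p.2 - p.1 > tol + 50 then -(PySem.Int.floordiv (tol + 50 - p.2 + p.1) tol) else 0) * tol, p.2)]) := by
  obtain ⟨s, e⟩ := p
  simp only at hpre ⊢
  by_cases hskip : acc ≠ [] ∧ pyLastSnd acc = e
  · rw [if_pos hskip]
    show capWhileA ((e - s).toNat + 1 + 1) acc s e tol = acc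
    rw [capWhileA_succ, if_neg (by tauto)]
  · rw [if_neg hskip]
    have hcond : acc = [] ∨ pyLastSnd acc ≠ e := by tauto
    have h1 : capWhileA ((e - s).toNat + 1 + 1) acc s e tol = acc ++ chunksF ((e - s).toNat + 1) s e tol :=
      capWhileA_chunksF e tol ((e - s).toNat + 1) s acc hcond
    have hpre' : (1 ≤ tol ∧ e - s ≤ tol * ((e - s).toNat + 1 : Nat) + tol + 50) ∨ e - s ≤ tol + 50 := by
      rcases hpre with htol | hsmall
      · left
        refine ⟨htol, ?_⟩
        by_cases h0 : e - s ≤ 0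
        · have hz : (e - s).toNat = 0 := by omega
          rw [hz]; push_cast; nlinarith
        · have hc : ((e - s).toNat : Int) = e - s := by omega
          push_cast
          rw [hc]
          nlinarith [mul_nonneg (by omega : (0:Int) ≤ tol - 1) (by omega : (0:Int) ≤ e - s + 1)]
      · right; exact hsmall
    have h2 : chunksF ((e - s).toNat + 1) s e tol = chunksB s e tol :=
      chunksF_eq_chunksB e tol ((e - s).toNat + 1) s hpre'
    show capWhileA ((e - s).toNat + 1 + 1) acc s e tol = _
    rw [h1, h2]
    simp [chunksB, chunkCount, List.append_assoc]

theorem fold_eq (tol : Int) :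
    ∀ (l : List (Int × Int)) (acc : List (Int × Int)),
      (∀ p ∈ l, 1 ≤ tol ∨ p.2 - p.1 ≤ tol + 50) →
      l.foldl (fun acc p => capWhileA ((p.2 - p.1).toNat + 2) acc p.1 p.2 tol) acc =
        l.foldl (fun out p =>
          if out ≠ [] ∧ pyLastSnd out = p.2 then out
          else
            let n : Int := if p.2 - p.1 > tol + 50 then -(PySem.Int.floordiv (tol + 50 - p.2 + p.1) tol) else 0
            (out ++ (PySem.List.pyRange 0 n 1).map (fun i => (p.1 + i * tol, p.1 + (i + 1) * tol)))
              ++ [(p.1 + n * tol, p.2)]) acc := by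
  intro l
  induction l with
  | nil => intro acc _; rfl
  | cons p tl ih =>
    intro acc hpre
    simp only [List.foldl_cons]
    rw [step_eq tol p acc (hpre p (List.mem_cons_self))]
    exact ih _ (fun q hq => hpre q (List.mem_cons_of_mem p hq))

-- ===== VERDICT (by name: the statement is the Claim_ definition above) =====
theorem cap_intervals_spec : Claim_equal_cap_intervals := by
  intro intervals tol _ hpre
  unfold Spec_cap_intervals cap_intervals cap_intervals_alt
  apply fold_eq
  intro p hp
  rcases hpre with h | h
  · exact Or.inl h
  · exact Or.inr (h p hp)
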